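-- pv_equiv track=rewrite | github.com/SurvivingJ/LinguaLoop-web | services/vocabulary_ladder/config.py | prev_active_level
-- ===== SOURCE A (Python) =====
-- def prev_active_level(current: int, active_levels: list[int]) -> int | None:
--     """Return the previous level in active_levels before current, or None if at min."""
--     try:
--         idx = active_levels.index(current)
--         if idx > 0:
--             return active_levels[idx - 1]
--     except ValueError:
--         below = [lv for lv in active_levels if lv < current]
--         if below:
--             return below[-1]
--     return None
-- ===== SOURCE B (Python) =====
-- def prev_active_level(current: int, active_levels: list[int]) -> int | None:
--     """Return the previous level in active_levels before current, or None if at min."""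
--     prev = None
--     last_below = None
--     for lv in active_levels:
--         if lv == current:
--             return prev
--         prev = lv
--         if lv < current:
--             last_below = lv
--     return last_below
-- ===== Notes on version B (the rewrite author's own statement) =====
-- stated objective: simpler
-- what changed: Replaced try/except list.index plus a filtering comprehension with one early-returning linear scan that keeps two accumulators (previous element, last element below current).
import Mathlib
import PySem

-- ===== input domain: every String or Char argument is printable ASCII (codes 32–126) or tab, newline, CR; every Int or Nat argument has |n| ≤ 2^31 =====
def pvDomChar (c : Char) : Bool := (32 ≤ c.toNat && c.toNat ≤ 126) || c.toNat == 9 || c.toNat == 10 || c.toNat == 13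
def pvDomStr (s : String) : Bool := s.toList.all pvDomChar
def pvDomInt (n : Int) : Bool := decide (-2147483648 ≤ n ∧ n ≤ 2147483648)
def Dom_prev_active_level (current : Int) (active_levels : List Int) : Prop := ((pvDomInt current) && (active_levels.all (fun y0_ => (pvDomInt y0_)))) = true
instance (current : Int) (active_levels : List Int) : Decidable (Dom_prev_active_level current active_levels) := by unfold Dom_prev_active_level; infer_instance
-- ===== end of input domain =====

-- B replaces try/except list.index + a comprehension with one early-returning scan
-- keeping two accumulators (previous element, last element below current): simpler.

-- ===== PORT A =====
def prev_active_level (current : Int) (active_levels : List Int) : Option Int :=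
  match PySem.List.index? active_levels current with
  | some idx =>
      -- try branch succeeded: idx = active_levels.index(current)
      if (idx : Int) > 0 then PySem.List.pyGet? active_levels ((idx : Int) - 1) else none
  | none =>
      -- ValueError branch
      let below := active_levels.filter (fun lv => lv < current)
      if below.isEmpty then none else PySem.List.pyGet? below (-1)

-- ===== PORT B =====
def prevActiveGo (current : Int) : List Int → Option Int → Option Int → Option Int
  | [], _, lastBelow => lastBelow
  | lv :: rest, prev, lastBelow =>
    if lv = current then prev
    else prevActiveGo current rest (some lv) (if lv < current then some lv else lastBelow)

def prev_active_level_alt (current : Int) (active_levels : List Int) : Option Int :=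
  prevActiveGo current active_levels none none

-- ===== PRECONDITION & SPEC =====
def Spec_prev_active_level (current : Int) (active_levels : List Int) (out : Option Int) : Prop := out = prev_active_level_alt current active_levels
instance (current : Int) (active_levels : List Int) (out : Option Int) : Decidable (Spec_prev_active_level current active_levels out) := by unfold Spec_prev_active_level; infer_instance

-- ===== CLAIM (what is proved, stated in full; the proofs are below) =====
def Claim_equal_prev_active_level : Prop := ∀ (current : Int) (active_levels : List Int), Dom_prev_active_level current active_levels → Spec_prev_active_level current active_levels (prev_active_level current active_levels)

-- ===== LEMMAS AND PROOFS =====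

-- Invariant of B's scan: with accumulators prev/lastBelow it computes A's case split,
-- with prev returned in the "found at index 0" case and lastBelow when nothing is below.
theorem prevActiveGo_eq (c : Int) (xs : List Int) (prev lastBelow : Option Int) :
    prevActiveGo c xs prev lastBelow =
      match PySem.List.index? xs c with
      | some idx => if (idx : Int) > 0 then PySem.List.pyGet? xs ((idx : Int) - 1) else prev
      | none =>
          let below := xs.filter (fun lv => lv < c)
          if below.isEmpty then lastBelow else below.getLast? := by
  induction xs generalizing prev lastBelow with
  | nil => simp [prevActiveGo, PySem.List.index?]
  | cons x rest ih =>
    by_cases hx : x = c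
    · subst hx
      rw [PySem.List.index?_cons_self]
      simp [prevActiveGo]
    · rw [PySem.List.index?_cons_of_ne rest hx]
      simp only [prevActiveGo, if_neg hx]
      rw [ih]
      cases hidx : PySem.List.index? rest c with
      | some i =>
        simp only [Option.map_some]
        cases i with
        | zero =>
          simp
        | succ k =>
          have h1 : ((k + 1 + 1 : ℕ) : Int) - 1 = ((k : Int) + 1) := by push_cast; ring
          have h2 : ((k + 1 : ℕ) : Int) - 1 = (k : Int) := by push_cast; ring
          simp only [h1, h2, PySem.List.pyGet?_cons_succ]
          have hk1 : ((k + 1 + 1 : ℕ) : Int) > 0 := by positivity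
          have hk2 : ((k + 1 : ℕ) : Int) > 0 := by positivity
          rw [if_pos hk1, if_pos hk2]
      | none =>
        simp only [Option.map_none]
        by_cases hlt : x < c
        · simp only [List.filter_cons, decide_eq_true_eq, if_pos hlt, List.isEmpty_cons]
          cases hrest : rest.filter (fun lv => lv < c) with
          | nil => simp
          | cons y ys => simp [List.getLast?_cons_cons]
        · simp [hlt]

-- ===== VERDICT (by name: the statement is the Claim_ definition above) =====
theorem prev_active_level_spec : Claim_equal_prev_active_level := by
  intro current active_levels _
  unfold Spec_prev_active_level prev_active_level prev_active_level_alt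
  rw [prevActiveGo_eq]
  cases h : PySem.List.index? active_levels current with
  | some i => rfl
  | none =>
    simp only []
    split
    · rfl
    · exact PySem.List.pyGet?_neg_one _
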